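-- pv_equiv track=rewrite | github.com/thierryxdp/TCC | problems/810/solution_252061.py | retira_pontuacao
-- ===== SOURCE A (Python) =====
-- def retira_pontuacao(f):
--     """dada uma frase retira todos os caracteres de pontuacao e troca por espacos str->str"""
--     if '-' in f:
--         f=str.replace(f,'-',' ')
--     if ',' in f:
--         f=str.replace(f,',',' ')
--     if ':' in f:
--         f=str.replace(f,':',' ')
--     if ';' in f:
--         f=str.replace(f,';',' ')
--     if '.' in f:
--         f=str.replace(f,'.',' ')
--     if '?' in f:
--         f=str.replace(f,'?',' ')
--     if '!' in f:
--         f=str.replace(f,'!',' ')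
--     return f
--
--     def inverte(f):
--         """dada uma frase, retorna outra frase que contenha as mesmas palavras da anterior na ordem
--         inversa, esm letras maiusculas, e sem a pontuacao. str->str"""
--         f=str.lower(f)
--         f=retira_pontuacao(f)
--
--         return f
-- ===== SOURCE B (Python) =====
-- def retira_pontuacao(f):
--     """dada uma frase retira todos os caracteres de pontuacao e troca por espacos str->str"""
--     return ''.join(' ' if c in '-,:;.?!' else c for c in f)
-- ===== Notes on version B (the rewrite author's own statement) =====
-- stated objective: simpler
-- what changed: Replaces A's seven sequential whole-string replace passes (each preceded by a membership scan) with a single character-by-character pass that maps each of the seven punctuation characters to a space.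
import Mathlib
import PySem

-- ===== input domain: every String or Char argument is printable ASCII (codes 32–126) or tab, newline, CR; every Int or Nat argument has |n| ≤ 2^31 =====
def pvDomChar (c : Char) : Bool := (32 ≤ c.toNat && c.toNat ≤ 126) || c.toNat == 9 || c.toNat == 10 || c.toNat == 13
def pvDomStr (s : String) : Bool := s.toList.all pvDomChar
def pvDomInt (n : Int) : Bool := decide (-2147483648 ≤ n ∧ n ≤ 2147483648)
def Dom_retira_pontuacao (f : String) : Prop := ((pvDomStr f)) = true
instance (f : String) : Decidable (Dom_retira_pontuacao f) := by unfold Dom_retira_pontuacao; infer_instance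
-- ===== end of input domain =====

-- B replaces A's seven sequential whole-string replace passes with one pass over the characters (objective: simpler).

-- ===== PORT A =====
def retira_pontuacao (f : String) : String :=
  let f := if PySem.Str.isIn "-" f then PySem.Str.replace f "-" " " else f
  let f := if PySem.Str.isIn "," f then PySem.Str.replace f "," " " else f
  let f := if PySem.Str.isIn ":" f then PySem.Str.replace f ":" " " else f
  let f := if PySem.Str.isIn ";" f then PySem.Str.replace f ";" " " else f
  let f := if PySem.Str.isIn "." f then PySem.Str.replace f "." " " else f
  let f := if PySem.Str.isIn "?" f then PySem.Str.replace f "?" " " else f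
  let f := if PySem.Str.isIn "!" f then PySem.Str.replace f "!" " " else f
  f

-- ===== PORT B =====
def retira_pontuacao_alt (f : String) : String :=
  String.ofList (f.toList.map (fun c => if c ∈ ['-', ',', ':', ';', '.', '?', '!'] then ' ' else c))

-- ===== PRECONDITION & SPEC =====
def Spec_retira_pontuacao (f : String) (out : String) : Prop := out = retira_pontuacao_alt f
instance (f : String) (out : String) : Decidable (Spec_retira_pontuacao f out) := by unfold Spec_retira_pontuacao; infer_instance

-- ===== CLAIM (what is proved, stated in full; the proofs are below) =====
def Claim_equal_retira_pontuacao : Prop := ∀ (f : String), Dom_retira_pontuacao f → Spec_retira_pontuacao f (retira_pontuacao f)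

-- ===== LEMMAS AND PROOFS =====

-- replace.go on a single-character pattern is a reverse-accumulating map
theorem pv_go_single (p r : Char) :
    ∀ (fuel : Nat) (l acc : List Char), l.length ≤ fuel →
      PySem.Chars.replace.go [p] [r] fuel l acc
        = acc.reverse ++ l.map (fun c => if c == p then r else c) := by
  intro fuel
  induction fuel with
  | zero =>
      intro l acc h
      have : l = [] := List.eq_nil_of_length_eq_zero (Nat.le_zero.mp h)
      subst this
      simp [PySem.Chars.replace.go]
  | succ n ih =>
      intro l acc h
      cases l with
      | nil => simp [PySem.Chars.replace.go]
      | cons c t =>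
          by_cases hp : c = p
          · subst hp
            have hpre : List.isPrefixOf [c] (c :: t) = true := by
              simp [List.isPrefixOf]
            simp only [PySem.Chars.replace.go, hpre, if_pos]
            rw [show List.drop [c].length (c :: t) = t from by simp,
                show [r].reverse ++ acc = r :: acc from by simp,
                ih t (r :: acc) (by simpa using Nat.le_of_succ_le_succ h)]
            simp
          · have hpre : List.isPrefixOf [p] (c :: t) = false := by
              simp [List.isPrefixOf]
              exact fun hh => absurd hh.symm hp
            simp only [PySem.Chars.replace.go, hpre]
            rw [if_neg (by simp)]
            rw [ih t (c :: acc) (by simpa using Nat.le_of_succ_le_succ h)]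
            simp [hp]

theorem pv_replace_single (p r : Char) (s : List Char) :
    PySem.Chars.replace s [p] [r] = s.map (fun c => if c == p then r else c) := by
  unfold PySem.Chars.replace
  simp only [List.isEmpty]
  rw [pv_go_single p r s.length s [] (le_refl _)]
  simp

theorem pv_step (p r : Char) (s : List Char) :
    (if PySem.Chars.isIn [p] s then PySem.Chars.replace s [p] [r] else s)
      = s.map (fun c => if c == p then r else c) := by
  by_cases h : PySem.Chars.isIn [p] s = true
  · simp [h, pv_replace_single]
  · have hnot : p ∉ s := by
      intro hmem
      apply h
      rw [PySem.Chars.isIn_iff_infix]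
      obtain ⟨u, v, rfl⟩ := List.mem_iff_append.mp hmem
      exact ⟨u, v, by simp⟩
    rw [if_neg h]
    have hmap : s.map (fun c => if c == p then r else c) = s.map id :=
      List.map_congr_left (fun c hc => by
        have hne : c ≠ p := fun hcp => hnot (hcp ▸ hc)
        simp [hne])
    rw [hmap, List.map_id]

theorem pv_stepS (ps : String) (p : Char) (hp : ps.toList = [p]) (s : String) :
    (if PySem.Str.isIn ps s then PySem.Str.replace s ps " " else s).toList
      = s.toList.map (fun c => if c == p then ' ' else c) := by
  rw [← pv_step p ' ' s.toList, PySem.Str.isIn_eq, hp]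
  by_cases h : PySem.Chars.isIn [p] s.toList = true
  · rw [if_pos h, if_pos h, PySem.Str.toList_replace, hp]
    rfl
  · rw [if_neg h, if_neg h]

theorem pv_point (c : Char) :
    (fun x => if x == '!' then ' ' else x)
      ((fun x => if x == '?' then ' ' else x)
      ((fun x => if x == '.' then ' ' else x)
      ((fun x => if x == ';' then ' ' else x)
      ((fun x => if x == ':' then ' ' else x)
      ((fun x => if x == ',' then ' ' else x)
      ((fun x => if x == '-' then ' ' else x) c))))))
      = if c ∈ ['-', ',', ':', ';', '.', '?', '!'] then ' ' else c := by
  by_cases h : c ∈ ['-', ',', ':', ';', '.', '?', '!']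
  · rw [if_pos h]
    fin_cases h <;> decide
  · rw [if_neg h]
    simp only [List.mem_cons, List.not_mem_nil, or_false, not_or] at h
    obtain ⟨h1, h2, h3, h4, h5, h6, h7⟩ := h
    simp [h1, h2, h3, h4, h5, h6, h7]

theorem retira_pontuacao_spec : Claim_equal_retira_pontuacao := by
  intro f _
  unfold Spec_retira_pontuacao
  rw [← String.toList_inj]
  unfold retira_pontuacao retira_pontuacao_alt
  dsimp only []
  rw [pv_stepS "!" '!' rfl, pv_stepS "?" '?' rfl, pv_stepS "." '.' rfl,
      pv_stepS ";" ';' rfl, pv_stepS ":" ':' rfl, pv_stepS "," ',' rfl,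
      pv_stepS "-" '-' rfl]
  simp only [List.map_map, Function.comp_def, String.toList_ofList]
  exact List.map_congr_left (fun c _ => pv_point c)
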